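-- pv_equiv track=rewrite | github.com/NalluriBharath/MAXILAB-TECHNICAL-ROUND | maxilab code.py | max_distinct_char
-- ===== SOURCE A (Python) =====
-- totalchars= 256
--
-- def max_distinct_char(str, n):
--     count = [0] * totalchars
--     for i in range(n):
--         count[ord(str[i])] += 1
--     max_distinct = 0
--     for i in range(totalchars):
--         if (count[i] != 0):
--             max_distinct += 1
--     return max_distinct
-- ===== SOURCE B (Python) =====
-- def max_distinct_char(str, n):
--     chars = [str[i] for i in range(n)]
--     count = 0
--     while chars:
--         first = chars[0]
--         chars = [c for c in chars if c != first]
--         count += 1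
--     return count
-- ===== Notes on version B (the rewrite author's own statement) =====
-- stated objective: alternative
-- what changed: Replaces the 256-slot frequency array plus alphabet-scan with a repeated-elimination loop: take the first remaining character, filter out all its copies, count one per round; the number of rounds is the number of distinct characters.
import Mathlib
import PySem

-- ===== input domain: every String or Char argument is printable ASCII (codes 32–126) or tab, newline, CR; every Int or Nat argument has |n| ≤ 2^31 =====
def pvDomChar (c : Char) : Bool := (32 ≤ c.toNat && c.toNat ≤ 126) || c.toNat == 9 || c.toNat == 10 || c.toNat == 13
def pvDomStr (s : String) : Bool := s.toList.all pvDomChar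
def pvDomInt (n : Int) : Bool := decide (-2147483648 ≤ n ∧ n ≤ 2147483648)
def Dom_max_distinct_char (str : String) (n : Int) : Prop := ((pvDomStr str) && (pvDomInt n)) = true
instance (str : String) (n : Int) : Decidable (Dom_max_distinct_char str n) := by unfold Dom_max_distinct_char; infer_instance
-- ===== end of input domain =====

-- B replaces A's 256-slot frequency array and its second pass over the alphabet with a
-- repeated-elimination loop (strip all copies of the first remaining character, one count
-- per round); a genuinely different algorithm of similar cost ('alternative').

-- ===== PORT A =====
-- count[ord(str[i])] += 1: in range under Pre_ (pyGet? = some); a none (IndexError) is excluded by Pre_.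
def max_distinct_char (str : String) (n : Int) : Int :=
  let count : List Int :=
    (PySem.List.pyRange 0 n 1).foldl
      (fun c i =>
        match PySem.Str.pyGet? str i with
        | some ch => c.set ch.toNat (c.getD ch.toNat 0 + 1)
        | none => c)
      (List.replicate 256 (0 : Int))
  (PySem.List.pyRange 0 256 1).foldl
    (fun acc i => if count.getD i.toNat 0 ≠ 0 then acc + 1 else acc) 0

-- ===== PORT B =====
-- B's while loop as recursion on chars: Python filters the WHOLE list by 'c != first';
-- the head 'first' itself never passes that test, so filtering the tail is the same list.
def pvLoop : List Char → Int → Int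
  | [], count => count
  | first :: rest, count => pvLoop (rest.filter (fun c => c ≠ first)) (count + 1)
termination_by l _ => l.length
decreasing_by
  simp only [List.length_unattach, List.length_cons]
  exact Nat.lt_succ_of_le (le_trans (List.length_filter_le _ _) (by simp))

def max_distinct_char_alt (str : String) (n : Int) : Int :=
  let chars : List Char :=
    (PySem.List.pyRange 0 n 1).foldl
      (fun l i =>
        match PySem.Str.pyGet? str i with
        | some ch => l ++ [ch]
        | none => l)
      []
  pvLoop chars 0

-- ===== PRECONDITION & SPEC =====
-- Pre_ excludes only n > len(str), where both Pythons raise IndexError.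
def Pre_max_distinct_char (str : String) (n : Int) : Prop := n ≤ (str.toList.length : Int)
instance (str : String) (n : Int) : Decidable (Pre_max_distinct_char str n) := by unfold Pre_max_distinct_char; infer_instance
def pvWitness_max_distinct_char : String × Int := ("abca", 3)

def Spec_max_distinct_char (str : String) (n : Int) (out : Int) : Prop := out = max_distinct_char_alt str n
instance (str : String) (n : Int) (out : Int) : Decidable (Spec_max_distinct_char str n out) := by unfold Spec_max_distinct_char; infer_instance

-- ===== CLAIM (what is proved, stated in full; the proofs are below) =====
def Claim_equal_max_distinct_char : Prop := ∀ (str : String) (n : Int), Dom_max_distinct_char str n → Pre_max_distinct_char str n → Spec_max_distinct_char str n (max_distinct_char str n)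

-- ===== LEMMAS AND PROOFS =====

-- A's frequency array over a list of characters.
def pvCountArr (M : List Char) : List Int :=
  M.foldl (fun c ch => c.set ch.toNat (c.getD ch.toNat 0 + 1)) (List.replicate 256 (0 : Int))

theorem pvCountArr_append (M : List Char) (c : Char) :
    pvCountArr (M ++ [c]) =
      (pvCountArr M).set c.toNat ((pvCountArr M).getD c.toNat 0 + 1) := by
  simp only [pvCountArr, List.foldl_append, List.foldl_cons, List.foldl_nil]

theorem pvCountArr_length (M : List Char) : (pvCountArr M).length = 256 := by
  induction M using List.reverseRecOn with
  | nil => simp only [pvCountArr, List.foldl_nil, List.length_replicate]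
  | append_singleton M c ih => rw [pvCountArr_append]; simpa using ih

theorem pvCountArr_spec (M : List Char) (hM : ∀ c ∈ M, c.toNat < 256) (i : Nat) :
    (pvCountArr M).getD i 0 = (M.countP (fun ch => ch.toNat == i) : Int) := by
  induction M using List.reverseRecOn with
  | nil =>
      simp only [pvCountArr, List.foldl_nil, List.countP_nil, Nat.cast_zero,
        List.getD_eq_getElem?_getD, List.getElem?_replicate]
      split <;> simp
  | append_singleton M c ih =>
      have hM' : ∀ x ∈ M, x.toNat < 256 := fun x hx => hM x (by simp [hx])
      have hc : c.toNat < 256 := hM c (by simp)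
      rw [pvCountArr_append, List.countP_append]
      by_cases hk : c.toNat = i
      · subst hk
        rw [List.getD_eq_getElem?_getD,
            List.getElem?_set_self (by rw [pvCountArr_length]; exact hc), Option.getD_some,
            ih hM']
        simp
      · rw [List.getD_eq_getElem?_getD, List.getElem?_set_ne hk,
            ← List.getD_eq_getElem?_getD, ih hM']
        simp [hk]

theorem pvCountArr_ne_zero (M : List Char) (hM : ∀ c ∈ M, c.toNat < 256) (i : Nat) :
    ((pvCountArr M).getD i 0 ≠ 0) ↔ ∃ ch ∈ M, ch.toNat = i := by
  rw [pvCountArr_spec M hM]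
  constructor
  · intro h
    have h0 : M.countP (fun ch => ch.toNat == i) ≠ 0 := by
      intro h0; exact h (by simp [h0])
    rcases List.countP_pos_iff.mp (Nat.pos_of_ne_zero h0) with ⟨ch, hm, hch⟩
    exact ⟨ch, hm, by simpa using hch⟩
  · rintro ⟨ch, hm, hch⟩
    have : 0 < M.countP (fun ch => ch.toNat == i) :=
      List.countP_pos_iff.mpr ⟨ch, hm, by simpa using hch⟩
    simpa using (by omega : M.countP (fun ch => ch.toNat == i) ≠ 0)

-- The alphabet pass over A's array counts exactly the distinct characters of M.
theorem pvDistinct_eq (M : List Char) (hM : ∀ c ∈ M, c.toNat < 256) :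
    (PySem.List.pyRange 0 256 1).countP
        (fun i => decide ((pvCountArr M).getD i.toNat 0 ≠ 0)) =
      M.toFinset.card := by
  induction M using List.reverseRecOn with
  | nil =>
      rw [List.countP_eq_length_filter, List.filter_eq_nil_iff.mpr, List.length_nil]
      · simp
      · intro i _
        simp only [ne_eq, pvCountArr, List.foldl_nil,
          List.getD_eq_getElem?_getD, List.getElem?_replicate]
        split <;> simp
  | append_singleton M c ih =>
      have hM' : ∀ x ∈ M, x.toNat < 256 := fun x hx => hM x (by simp [hx])
      have hMc : ∀ x ∈ M ++ [c], x.toNat < 256 := hM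
      have hc : c.toNat < 256 := hM c (by simp)
      have hfin : (M ++ [c]).toFinset = insert c M.toFinset := by
        ext x; simp
      by_cases hmem : c ∈ M
      · -- character already seen: both sides unchanged
        have hsame : (PySem.List.pyRange 0 256 1).countP
            (fun i => decide ((pvCountArr (M ++ [c])).getD i.toNat 0 ≠ 0)) =
            (PySem.List.pyRange 0 256 1).countP
            (fun i => decide ((pvCountArr M).getD i.toNat 0 ≠ 0)) := by
          apply List.countP_congr
          intro i _
          simp only [decide_eq_true_eq, pvCountArr_ne_zero _ hMc, pvCountArr_ne_zero _ hM']
          constructor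
          · rintro ⟨x, hx, hxt⟩
            rcases (by simpa using hx : x ∈ M ∨ x = c) with hx' | rfl
            · exact ⟨x, hx', hxt⟩
            · exact ⟨x, hmem, hxt⟩
          · rintro ⟨x, hx, hxt⟩; exact ⟨x, by simp [hx], hxt⟩
        rw [hsame, ih hM', hfin, Finset.insert_eq_self.mpr (List.mem_toFinset.mpr hmem)]
      · -- new character: exactly one new nonzero slot, the character set grows by one
        have hcle : (c.toNat : Int) < 256 := by exact_mod_cast hc
        have hsplit : PySem.List.pyRange 0 256 1 =
            PySem.List.pyRange 0 (c.toNat : Int) 1 ++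
            ((c.toNat : Int) :: PySem.List.pyRange ((c.toNat : Int) + 1) 256 1) := by
          rw [PySem.List.pyRange_one_append 0 (c.toNat : Int) 256 (by omega) (by omega),
              PySem.List.pyRange_one_cons hcle]
        have hside : ∀ i : Int, i.toNat ≠ c.toNat →
            (decide ((pvCountArr (M ++ [c])).getD i.toNat 0 ≠ 0)) =
            (decide ((pvCountArr M).getD i.toNat 0 ≠ 0)) := by
          intro i hne
          simp only [decide_eq_decide, pvCountArr_ne_zero _ hMc, pvCountArr_ne_zero _ hM']
          constructor
          · rintro ⟨x, hx, hxt⟩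
            rcases (by simpa using hx : x ∈ M ∨ x = c) with hx' | rfl
            · exact ⟨x, hx', hxt⟩
            · exact absurd hxt hne.symm
          · rintro ⟨x, hx, hxt⟩; exact ⟨x, by simp [hx], hxt⟩
        have hL : ∀ i ∈ PySem.List.pyRange 0 (c.toNat : Int) 1,
            (decide ((pvCountArr (M ++ [c])).getD i.toNat 0 ≠ 0)) = true ↔
            (decide ((pvCountArr M).getD i.toNat 0 ≠ 0)) = true := by
          intro i hi
          rw [PySem.List.mem_pyRange_one] at hi
          rw [hside i (by omega)]
        have hR : ∀ i ∈ PySem.List.pyRange ((c.toNat : Int) + 1) 256 1,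
            (decide ((pvCountArr (M ++ [c])).getD i.toNat 0 ≠ 0)) = true ↔
            (decide ((pvCountArr M).getD i.toNat 0 ≠ 0)) = true := by
          intro i hi
          rw [PySem.List.mem_pyRange_one] at hi
          rw [hside i (by omega)]
        have hAt : (decide ((pvCountArr (M ++ [c])).getD ((c.toNat : Int)).toNat 0 ≠ 0)) = true := by
          simp only [Int.toNat_natCast, decide_eq_true_eq, pvCountArr_ne_zero _ hMc]
          exact ⟨c, by simp, rfl⟩
        have hAtM : (decide ((pvCountArr M).getD ((c.toNat : Int)).toNat 0 ≠ 0)) = false := by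
          simp only [Int.toNat_natCast, decide_eq_false_iff_not, pvCountArr_ne_zero _ hM']
          rintro ⟨x, hx, hxt⟩
          have hxc : x = c := by rw [← Char.ofNat_toNat x, ← Char.ofNat_toNat c, hxt]
          exact hmem (hxc ▸ hx)
        have hih := ih hM'
        rw [hsplit, List.countP_append, List.countP_cons, hAtM] at hih
        rw [hsplit, List.countP_append, List.countP_cons, hAt,
            List.countP_congr hL, List.countP_congr hR, hfin,
            Finset.card_insert_of_notMem (by simpa using hmem)]
        norm_num at hih ⊢
        omega

-- B's elimination loop counts one round per distinct character of its list
-- (induction on a length bound: each round strictly shortens the list).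
theorem pvLoop_eq_aux (N : Nat) : ∀ l : List Char, l.length ≤ N → ∀ k : Int,
    pvLoop l k = k + (l.toFinset.card : Int) := by
  induction N with
  | zero =>
      intro l hl k
      have : l = [] := List.eq_nil_of_length_eq_zero (by omega)
      subst this; simp [pvLoop]
  | succ N ih =>
      intro l hl k
      match l with
      | [] => simp [pvLoop]
      | first :: rest =>
          rw [pvLoop, ih _ (le_trans (List.length_filter_le _ _)
            (by simpa using Nat.lt_succ_iff.mp (by simpa using hl)))]
          have hfil : (rest.filter (fun c => c ≠ first)).toFinset = rest.toFinset.erase first := by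
            ext x; simp [and_comm]
          have h2 : (first :: rest).toFinset = insert first (rest.toFinset.erase first) := by
            ext x; by_cases hx : x = first <;> simp [hx]
          rw [hfil, h2, Finset.card_insert_of_notMem (Finset.notMem_erase _ _)]
          push_cast
          ring

theorem pvLoop_eq (l : List Char) (k : Int) : pvLoop l k = k + (l.toFinset.card : Int) :=
  pvLoop_eq_aux l.length l le_rfl k

-- the comprehension loop rebuilds its input list
theorem pvFoldlAppend (M : List Char) : M.foldl (fun l ch => l ++ [ch]) [] = M := by
  induction M using List.reverseRecOn with
  | nil => rfl
  | append_singleton M c ih => rw [List.foldl_append]; simp [ih]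

-- A loop 'for i in range(m): … str[i] …' visits exactly the first m characters (m ≤ len).
theorem pvFoldPrefix {α : Type} (str : String) (f : α → Char → α) (init : α)
    (m : Nat) (h : m ≤ str.toList.length) :
    (PySem.List.pyRange 0 (m : Int) 1).foldl
        (fun s i => match PySem.Str.pyGet? str i with | some ch => f s ch | none => s) init =
      (str.toList.take m).foldl f init := by
  induction m with
  | zero => simp [PySem.List.pyRange_one_eq_nil]
  | succ k ih =>
      have hk : k < str.toList.length := by omega
      have hcast : ((k + 1 : Nat) : Int) = (k : Int) + 1 := by push_cast; ring
      rw [hcast, PySem.List.pyRange_one_succ_right (by omega), List.foldl_append,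
          ih (by omega), List.take_add_one, List.getElem?_eq_getElem hk]
      simp [List.getElem?_eq_getElem hk, Option.toList]
      rw [List.take_add_one, List.getElem?_eq_getElem hk,
        show (some str.toList[k]).toList = [str.toList[k]] from rfl,
        List.foldl_append, List.foldl_cons, List.foldl_nil]

theorem pvFoldPrefixInt {α : Type} (str : String) (f : α → Char → α) (init : α)
    (n : Int) (h : n ≤ (str.toList.length : Int)) :
    (PySem.List.pyRange 0 n 1).foldl
        (fun s i => match PySem.Str.pyGet? str i with | some ch => f s ch | none => s) init =
      (str.toList.take n.toNat).foldl f init := by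
  rcases le_or_gt n 0 with hn | hn
  · rw [PySem.List.pyRange_one_eq_nil hn]
    simp [Int.toNat_of_nonpos hn]
  · have hcast : n = (n.toNat : Int) := by omega
    rw [hcast]
    exact pvFoldPrefix str f init n.toNat (by omega)

-- ===== VERDICT (by name: the statement is the Claim_ definition above) =====
theorem max_distinct_char_spec : Claim_equal_max_distinct_char := by
  intro str n hdom hpre
  have hlen : n ≤ (str.toList.length : Int) := hpre
  unfold Spec_max_distinct_char
  simp only [max_distinct_char, max_distinct_char_alt]
  rw [pvFoldPrefixInt str (fun c ch => c.set ch.toNat (c.getD ch.toNat 0 + 1))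
        (List.replicate 256 (0 : Int)) n hlen,
      pvFoldPrefixInt str (fun l ch => l ++ [ch]) ([] : List Char) n hlen]
  have h256 : ∀ c ∈ str.toList.take n.toNat, c.toNat < 256 := by
    intro c hc
    have hc' : c ∈ str.toList := List.mem_of_mem_take hc
    have hdc : pvDomChar c = true := by
      have hs := ((Bool.and_eq_true _ _).mp hdom).1
      exact List.all_eq_true.mp hs c hc'
    simp [pvDomChar] at hdc
    omega
  rw [PySem.List.foldl_ite_add_one, pvFoldlAppend, pvLoop_eq,
      show (List.foldl (fun c ch => c.set ch.toNat (c.getD ch.toNat 0 + 1))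
          (List.replicate 256 (0 : Int)) (str.toList.take n.toNat)) =
        pvCountArr (str.toList.take n.toNat) from rfl,
      pvDistinct_eq (str.toList.take n.toNat) h256]
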